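-- pv_equiv track=rewrite | github.com/RileySinclair/WOSG | wos.py | split_lists
-- ===== SOURCE A (Python) =====
-- def split_lists(list_of_items: list, max_length: int = 1500) -> list:
--     """Take a list of objects and split it into lists whose str() approach but does not exceed max_length."""
--     list_of_lists = []
--     current_length = 0
--     start_point = 0
--     for each in range(len(list_of_items)):
--         current_length += len(list_of_items[each]) + 4
--         try:
--             if current_length + len(list_of_items[each + 1]) + 4 > max_length:
--                 list_of_lists.append(list_of_items[start_point:each + 1])
--                 current_length = 0
--                 start_point = each + 1
--         except IndexError:
--             pass
--     list_of_lists.append(list_of_items[start_point:])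
--     return list_of_lists
-- ===== SOURCE B (Python) =====
-- def split_lists(list_of_items: list, max_length: int = 1500) -> list:
--     """Take a list of objects and split it into lists whose str() approach but does not exceed max_length."""
--     chunks = []
--     rest = list_of_items
--     while rest:
--         # a chunk always takes its first item, then extends while the weight sum stays within max_length
--         total = len(rest[0]) + 4
--         k = 1
--         while k < len(rest) and total + len(rest[k]) + 4 <= max_length:
--             total += len(rest[k]) + 4
--             k += 1
--         chunks.append(rest[:k])
--         rest = rest[k:]
--     return chunks or [[]]
-- ===== Notes on version B (the rewrite author's own statement) =====
-- stated objective: simpler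
-- what changed: Replaces A's single indexed pass with one-element lookahead, index slices by saved start points, and a try/except IndexError guard by a chunk-at-a-time greedy: each outer step takes the forced first remaining item and extends the chunk while the running weight stays within max_length, so no lookahead or exception handling is needed.
import Mathlib
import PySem

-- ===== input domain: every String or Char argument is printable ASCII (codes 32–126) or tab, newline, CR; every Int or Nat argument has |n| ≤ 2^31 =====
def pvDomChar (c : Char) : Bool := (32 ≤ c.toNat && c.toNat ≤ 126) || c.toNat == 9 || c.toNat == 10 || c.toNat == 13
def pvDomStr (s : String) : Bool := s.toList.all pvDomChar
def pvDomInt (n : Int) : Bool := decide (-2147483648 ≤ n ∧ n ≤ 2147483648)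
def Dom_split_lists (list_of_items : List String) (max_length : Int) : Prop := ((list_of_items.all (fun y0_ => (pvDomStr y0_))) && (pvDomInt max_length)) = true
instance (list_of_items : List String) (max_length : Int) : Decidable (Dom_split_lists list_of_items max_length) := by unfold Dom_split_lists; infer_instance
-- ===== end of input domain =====

-- B replaces A's lookahead-and-flush indexed pass (with its try/except guard) by a
-- chunk-at-a-time greedy loop; same return value everywhere, objective: simpler.

-- ===== PORT A =====
-- the for-loop of A, carrying (list_of_lists, current_length, start_point); `remaining`
-- counts the iterations left (loop entered with remaining = len(list_of_items), so each
-- runs over range(len(list_of_items))); the final append after the loop is the base case.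
-- list_of_items[each] is indexed with pyGet? (provably in range, so the .getD "" default
-- is never used); the try/except IndexError around the lookahead is the bounds test
-- `each + 1 < length`.
def splitLoopA (items : List String) (maxL : Int) :
    Nat → Nat → List (List String) → Int → Nat → List (List String)
  | 0, _each, acc, _cur, start =>
    acc ++ [PySem.List.slice items (some (start : Int)) none]
  | remaining + 1, each, acc, cur, start =>
    let cur := cur + PySem.Str.len ((PySem.List.pyGet? items (each : Int)).getD "") + 4
    if each + 1 < items.length then
      if cur + PySem.Str.len ((PySem.List.pyGet? items ((each : Int) + 1)).getD "") + 4 > maxL then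
        splitLoopA items maxL remaining (each + 1)
          (acc ++ [PySem.List.slice items (some (start : Int)) (some ((each : Int) + 1))])
          0 (each + 1)
      else
        splitLoopA items maxL remaining (each + 1) acc cur start
    else
      -- IndexError on the lookahead: pass
      splitLoopA items maxL remaining (each + 1) acc cur start

def split_lists (list_of_items : List String) (max_length : Int) : List (List String) :=
  splitLoopA list_of_items max_length list_of_items.length 0 [] 0 0

-- ===== PORT B =====
-- inner while of Source B, as the obvious structural recursion over the part of `rest`
-- after the forced first item: how many further items fit in the current chunk
def fitLenB (maxL : Int) : List String → Int → Nat
  | [], _total => 0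
  | y :: ys, total =>
    if total + PySem.Str.len y + 4 ≤ maxL then
      fitLenB maxL ys (total + PySem.Str.len y + 4) + 1
    else 0

-- outer while of Source B; `fuel` makes the recursion structural (called with
-- fuel = rest.length, which always suffices since every chunk takes ≥ 1 item)
def goBF (maxL : Int) : Nat → List String → List (List String)
  | _, [] => []
  | 0, _ :: _ => []
  | fuel + 1, x :: xs =>
    (x :: xs.take (fitLenB maxL xs (PySem.Str.len x + 4)))
      :: goBF maxL fuel (xs.drop (fitLenB maxL xs (PySem.Str.len x + 4)))

def split_lists_alt (list_of_items : List String) (max_length : Int) : List (List String) :=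
  let chunks := goBF max_length list_of_items.length list_of_items
  if chunks.isEmpty then [[]] else chunks

-- ===== PRECONDITION & SPEC =====
def Spec_split_lists (list_of_items : List String) (max_length : Int) (out : List (List String)) : Prop := out = split_lists_alt list_of_items max_length
instance (list_of_items : List String) (max_length : Int) (out : List (List String)) : Decidable (Spec_split_lists list_of_items max_length out) := by unfold Spec_split_lists; infer_instance

-- ===== CLAIM (what is proved, stated in full; the proofs are below) =====
def Claim_equal_split_lists : Prop := ∀ (list_of_items : List String) (max_length : Int), Dom_split_lists list_of_items max_length → Spec_split_lists list_of_items max_length (split_lists list_of_items max_length)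

-- ===== LEMMAS AND PROOFS =====

-- weight of item j (proof-side abbreviation)
def wI (items : List String) (j : Nat) : Int := PySem.Str.len (items.getD j "") + 4

-- B's state seen from A's: the chunk began at `start`, A is processing index `each`
-- with accumulated weight t + wI items each
def goAux (maxL : Int) (items : List String) (start each : Nat) (t : Int) : List (List String) :=
  (items.drop start).take (each + 1 - start + fitLenB maxL (items.drop (each + 1)) (t + wI items each))
    :: goBF maxL items.length
        ((items.drop (each + 1)).drop (fitLenB maxL (items.drop (each + 1)) (t + wI items each)))

lemma splitLoopA_zero (items : List String) (maxL : Int) (each : Nat)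
    (acc : List (List String)) (cur : Int) (start : Nat) :
    splitLoopA items maxL 0 each acc cur start
      = acc ++ [PySem.List.slice items (some (start : Int)) none] := rfl

lemma splitLoopA_succ (items : List String) (maxL : Int) (rem each : Nat)
    (acc : List (List String)) (cur : Int) (start : Nat) :
    splitLoopA items maxL (rem + 1) each acc cur start
      = if each + 1 < items.length then
          if cur + PySem.Str.len ((PySem.List.pyGet? items (each : Int)).getD "") + 4
              + PySem.Str.len ((PySem.List.pyGet? items ((each : Int) + 1)).getD "") + 4 > maxL then
            splitLoopA items maxL rem (each + 1)
              (acc ++ [PySem.List.slice items (some (start : Int)) (some ((each : Int) + 1))])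
              0 (each + 1)
          else
            splitLoopA items maxL rem (each + 1) acc
              (cur + PySem.Str.len ((PySem.List.pyGet? items (each : Int)).getD "") + 4) start
        else
          splitLoopA items maxL rem (each + 1) acc
            (cur + PySem.Str.len ((PySem.List.pyGet? items (each : Int)).getD "") + 4) start := rfl

lemma goBF_nil (maxL : Int) (f : Nat) : goBF maxL f [] = [] := by cases f <;> rfl

lemma goBF_succ (maxL : Int) (f : Nat) (x : String) (xs : List String) :
    goBF maxL (f + 1) (x :: xs)
      = (x :: xs.take (fitLenB maxL xs (PySem.Str.len x + 4)))
          :: goBF maxL f (xs.drop (fitLenB maxL xs (PySem.Str.len x + 4))) := rfl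

lemma goBF_fuel (maxL : Int) :
    ∀ (f₁ f₂ : Nat) (rest : List String), rest.length ≤ f₁ → rest.length ≤ f₂ →
    goBF maxL f₁ rest = goBF maxL f₂ rest := by
  intro f₁
  induction f₁ with
  | zero =>
    intro f₂ rest h1 _
    have : rest = [] := List.length_eq_zero_iff.mp (by omega)
    subst this
    rw [goBF_nil, goBF_nil]
  | succ f ih =>
    intro f₂ rest h1 h2
    match rest, f₂ with
    | [], _ => rw [goBF_nil, goBF_nil]
    | x :: xs, g + 1 =>
      rw [goBF_succ, goBF_succ]
      congr 1
      apply ih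
      · have := List.length_drop (l := xs) (i := fitLenB maxL xs (PySem.Str.len x + 4))
        simp only [List.length_cons] at h1
        omega
      · have := List.length_drop (l := xs) (i := fitLenB maxL xs (PySem.Str.len x + 4))
        simp only [List.length_cons] at h2
        omega

lemma pyGet_in_range (items : List String) (j : Nat) (h : j < items.length) :
    (PySem.List.pyGet? items (j : Int)).getD "" = items.getD j "" := by
  simp [PySem.List.pyGet?_natCast, List.getElem?_eq_getElem h]

lemma goAux_fresh (maxL : Int) (items : List String) (s : Nat) (hs : s < items.length) :
    goAux maxL items s s 0 = goBF maxL items.length (items.drop s) := by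
  have hsfx : items.drop s = items.getD s "" :: items.drop (s + 1) := by
    rw [List.getD_eq_getElem _ _ hs]
    exact List.drop_eq_getElem_cons hs
  have hw : (0 : Int) + wI items s = PySem.Str.len (items.getD s "") + 4 := by unfold wI; ring
  have hfuel : items.length = (items.length - 1) + 1 := by omega
  unfold goAux
  rw [hw]
  conv_rhs => rw [hfuel, hsfx, goBF_succ]
  congr 1
  · rw [hsfx]
    have h1 : s + 1 - s = 1 := by omega
    rw [h1, Nat.add_comm 1 _, List.take_succ_cons]
  · apply goBF_fuel
    · have h1 := List.length_drop (l := items) (i := s + 1)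
      have h2 := List.length_drop (l := items.drop (s + 1))
        (i := fitLenB maxL (items.drop (s + 1)) (PySem.Str.len (items.getD s "") + 4))
      omega
    · have h1 := List.length_drop (l := items) (i := s + 1)
      have h2 := List.length_drop (l := items.drop (s + 1))
        (i := fitLenB maxL (items.drop (s + 1)) (PySem.Str.len (items.getD s "") + 4))
      omega

lemma key_lemma (items : List String) (maxL : Int) :
    ∀ r each t start acc, each + r + 1 = items.length → start ≤ each →
    splitLoopA items maxL (r + 1) each acc t start = acc ++ goAux maxL items start each t := by
  intro r
  induction r with
  | zero =>
    intro each t start acc hr hs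
    rw [splitLoopA_succ, if_neg (by omega), splitLoopA_zero]
    unfold goAux
    have hnil : items.drop (each + 1) = [] := by
      apply List.drop_eq_nil_of_le; omega
    rw [hnil]
    simp only [fitLenB, List.drop_nil, goBF_nil]
    have htk : each + 1 - start + 0 = (items.drop start).length := by simp; omega
    rw [htk, List.take_length]
    simp [PySem.List.slice_from_natCast]
  | succ r ih =>
    intro each t start acc hr hs
    have hj : each < items.length := by omega
    have h2 : each + 1 < items.length := by omega
    rw [splitLoopA_succ, if_pos h2, pyGet_in_range items each hj]
    have hget : (PySem.List.pyGet? items ((each : Int) + 1)).getD "" = items.getD (each + 1) "" := by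
      have := pyGet_in_range items (each + 1) h2
      push_cast at this ⊢
      exact this
    rw [hget]
    have hsfx : items.drop (each + 1) = items.getD (each + 1) "" :: items.drop (each + 2) := by
      rw [List.getD_eq_getElem _ _ h2]
      exact List.drop_eq_getElem_cons h2
    by_cases hflush : t + PySem.Str.len (items.getD each "") + 4
        + PySem.Str.len (items.getD (each + 1) "") + 4 > maxL
    · rw [if_pos hflush]
      rw [ih (each + 1) 0 (each + 1) _ (by omega) (le_refl _)]
      rw [goAux_fresh maxL items (each + 1) h2]
      unfold goAux
      -- A flushes here, so fitLenB on the running chunk's state takes nothing more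
      have hfit0 : fitLenB maxL (items.drop (each + 1)) (t + wI items each) = 0 := by
        rw [hsfx, fitLenB, if_neg (by unfold wI; omega)]
      rw [hfit0]
      have htk : (items.drop start).take (each + 1 - start + 0)
          = PySem.List.slice items (some (start : Int)) (some ((each : Int) + 1)) := by
        have hc : (each : Int) + 1 = ((each + 1 : Nat) : Int) := by push_cast; ring
        rw [hc, PySem.List.slice_natCast, Nat.add_zero]
      rw [htk, List.drop_zero]
      simp
    · rw [if_neg hflush]
      rw [ih (each + 1) (t + PySem.Str.len (items.getD each "") + 4) start _ (by omega) (by omega)]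
      unfold goAux
      have hfitS : fitLenB maxL (items.drop (each + 1)) (t + wI items each)
          = fitLenB maxL (items.drop (each + 2))
              ((t + PySem.Str.len (items.getD each "") + 4) + wI items (each + 1)) + 1 := by
        have harg : t + wI items each + PySem.Str.len (items.getD (each + 1) "") + 4
            = (t + PySem.Str.len (items.getD each "") + 4) + wI items (each + 1) := by
          unfold wI; ring
        rw [hsfx, fitLenB, if_pos (by unfold wI; omega), harg]
      have hE : each + 1 + 1 = each + 2 := rfl
      simp only [hE]
      rw [hfitS]
      have hidx : each + 1 - start
            + (fitLenB maxL (items.drop (each + 2))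
                ((t + PySem.Str.len (items.getD each "") + 4) + wI items (each + 1)) + 1)
          = each + 2 - start
            + fitLenB maxL (items.drop (each + 2))
                ((t + PySem.Str.len (items.getD each "") + 4) + wI items (each + 1)) := by
        omega
      rw [hidx]
      have hdr : (items.drop (each + 1)).drop
            (fitLenB maxL (items.drop (each + 2))
                ((t + PySem.Str.len (items.getD each "") + 4) + wI items (each + 1)) + 1)
          = (items.drop (each + 2)).drop
            (fitLenB maxL (items.drop (each + 2))
                ((t + PySem.Str.len (items.getD each "") + 4) + wI items (each + 1))) := by
        rw [hsfx, List.drop_succ_cons]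
      rw [hdr]

theorem split_lists_spec : Claim_equal_split_lists := by
  intro items maxL _hdom
  unfold Spec_split_lists split_lists split_lists_alt
  match items with
  | [] => simp [splitLoopA_zero, goBF_nil]
  | x :: xs =>
    have hlen : (x :: xs).length = ((x :: xs).length - 1) + 1 := by simp
    rw [hlen, key_lemma (x :: xs) maxL ((x :: xs).length - 1) 0 0 0 []
      (by simp [List.length_cons]) (le_refl _), ← hlen]
    rw [List.nil_append, goAux_fresh maxL (x :: xs) 0 (by simp), List.drop_zero]
    rw [List.length_cons, goBF_succ]
    simp
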